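-- pv_equiv track=rewrite | github.com/SymposiumOrganization/EQLearner | lib/src/eqlearner/dataset/processing/tokenization.py | flatten_seq
-- ===== SOURCE A (Python) =====
-- def default_map():
--     default_map = {"x": 1, "sin": 2, "exp": 3, "log": 4, "(": 5, ")": 6, "**": 7, "*":8, "+":9,
--                     "/": 10, "E": 11, "S": 12, "F": 13, "sqrt":14, "-": 15}
--     max_val =  max(list(default_map.values()))
--     numbers = {str(n): max_val+n for n in range(1,10)}
--     default_map = {**default_map, **numbers}
--     max_val =  max(list(default_map.values()))
--     return default_map, max_val
--
-- def flatten_seq(d, mapping=None):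
--     if not mapping:
--         mapping, _ = default_map()
--     int_sum = mapping["+"]
--     res = [mapping["S"]]
--     for key, li in d.items():
--         for expression in li:
--             res.extend(expression)
--             #tokenized_term = [elem.exact_type for elem in list(tokenize.tokenize(BytesIO(str(element).encode('utf-8')).readline))]
--             #tokenized_list.append(tokenized_term)
--             res.append(int_sum)
--         #tokenized_dict[key] = tokenized_list
--     if len(res) == 1:
--         return [mapping["S"],mapping["F"] ]
--     else:
--         res[-1] = mapping["F"]
--         return res
-- ===== SOURCE B (Python) =====
-- def default_map():
--     default_map = {"x": 1, "sin": 2, "exp": 3, "log": 4, "(": 5, ")": 6, "**": 7, "*":8, "+":9,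
--                     "/": 10, "E": 11, "S": 12, "F": 13, "sqrt":14, "-": 15}
--     max_val =  max(list(default_map.values()))
--     numbers = {str(n): max_val+n for n in range(1,10)}
--     default_map = {**default_map, **numbers}
--     max_val =  max(list(default_map.values()))
--     return default_map, max_val
--
-- def _join(sep, lists):
--     if not lists:
--         return []
--     if len(lists) == 1:
--         return list(lists[0])
--     return list(lists[0]) + [sep] + _join(sep, lists[1:])
--
-- def flatten_seq(d, mapping=None):
--     if not mapping:
--         mapping, _ = default_map()
--     exprs = [e for li in d.values() for e in li]
--     return [mapping["S"]] + _join(mapping["+"], exprs) + [mapping["F"]]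
-- ===== Notes on version B (the rewrite author's own statement) =====
-- stated objective: simpler
-- what changed: B is a two-stage decomposition: it first flattens the dict values into one list of expressions with a comprehension, then builds [S] + join(+, exprs) + [F] with a recursive separator-join helper, replacing A's accumulator loop that appends a trailing separator after every expression and then length-checks and patches the last element in place.
import Mathlib
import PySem

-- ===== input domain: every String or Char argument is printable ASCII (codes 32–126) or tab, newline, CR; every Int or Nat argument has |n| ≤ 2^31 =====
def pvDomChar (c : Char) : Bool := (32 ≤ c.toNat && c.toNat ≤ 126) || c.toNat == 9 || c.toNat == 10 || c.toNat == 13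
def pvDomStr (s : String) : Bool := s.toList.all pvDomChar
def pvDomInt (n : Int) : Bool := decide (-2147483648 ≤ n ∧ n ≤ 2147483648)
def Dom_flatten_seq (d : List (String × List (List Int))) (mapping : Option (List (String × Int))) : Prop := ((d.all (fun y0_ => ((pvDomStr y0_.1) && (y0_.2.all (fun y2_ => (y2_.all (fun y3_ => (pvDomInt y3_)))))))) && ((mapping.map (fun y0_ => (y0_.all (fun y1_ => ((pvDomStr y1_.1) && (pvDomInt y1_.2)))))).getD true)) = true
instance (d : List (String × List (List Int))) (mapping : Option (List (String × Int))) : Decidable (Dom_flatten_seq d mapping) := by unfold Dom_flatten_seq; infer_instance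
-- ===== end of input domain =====

-- B re-decomposes the task into two stages: first flatten the dict values into one list of
-- expressions, then build the result as [S] + separator-join(+, exprs) + [F] with a recursive
-- join helper — no accumulator loop over the dict and no in-place patch of the last element; simpler, same cost.

-- ===== PORT A =====
-- shared module-level helper default_map() (same code in Source A and Source B)
def default_map_port : PySem.Dict String Int × Int :=
  let dm : PySem.Dict String Int := PySem.Dict.ofList
    [("x", 1), ("sin", 2), ("exp", 3), ("log", 4), ("(", 5), (")", 6), ("**", 7), ("*", 8),
     ("+", 9), ("/", 10), ("E", 11), ("S", 12), ("F", 13), ("sqrt", 14), ("-", 15)]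
  -- max(list(dm.values())): the dict literal is nonempty, so Python's max returns; getD 0 is unreachable
  let max_val : Int := (PySem.List.max? dm.values (fun x => x)).getD 0
  let numbers : PySem.Dict String Int :=
    (PySem.List.pyRange 1 10 1).foldl (fun nd n => nd.insert (PySem.Int.toStr n) (max_val + n)) PySem.Dict.empty
  let dm := numbers.items.foldl (fun m kv => m.insert kv.1 kv.2) dm
  let max_val : Int := (PySem.List.max? dm.values (fun x => x)).getD 0
  (dm, max_val)

-- 'if not mapping: mapping, _ = default_map()' — a falsy mapping argument selects the default map (same code in Source A and Source B)
def pvFlattenMap (mapping : Option (List (String × Int))) : PySem.Dict String Int :=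
  match mapping with
  | none => default_map_port.1
  | some l => if l.isEmpty then default_map_port.1 else PySem.Dict.ofList l

def flatten_seq (d : List (String × List (List Int))) (mapping : Option (List (String × Int))) : List Int :=
  let m := pvFlattenMap mapping
  -- mapping["+"], mapping["S"], mapping["F"]: Pre_ guarantees the keys exist (KeyError otherwise)
  let int_sum : Int := (m.get? "+").getD 0
  let res : List Int := [(m.get? "S").getD 0]
  let res := ((PySem.Dict.ofList d).items).foldl
    (fun res kv => kv.2.foldl (fun res expression => (res ++ expression) ++ [int_sum]) res) res
  if res.length = 1 then
    [(m.get? "S").getD 0, (m.get? "F").getD 0]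
  else
    res.dropLast ++ [(m.get? "F").getD 0]    -- res[-1] = mapping["F"] (res is nonempty here)

-- ===== PORT B =====
-- _join(sep, lists): recursive separator join
def pvJoin (sep : Int) : List (List Int) → List Int
  | [] => []
  | [e] => e
  | e :: rest => e ++ sep :: pvJoin sep rest

def flatten_seq_alt (d : List (String × List (List Int))) (mapping : Option (List (String × Int))) : List Int :=
  let m := pvFlattenMap mapping
  -- exprs = [e for li in d.values() for e in li]
  let exprs : List (List Int) := ((PySem.Dict.ofList d).values).flatMap (fun li => li)
  [(m.get? "S").getD 0] ++ pvJoin ((m.get? "+").getD 0) exprs ++ [(m.get? "F").getD 0]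

-- ===== PRECONDITION & SPEC =====
-- Pre_ excludes exactly the mappings on which A raises KeyError: a given, non-empty mapping
-- that lacks one of the keys "+", "S", "F" (the default map always has them).
def Pre_flatten_seq (d : List (String × List (List Int))) (mapping : Option (List (String × Int))) : Prop :=
  (match mapping with
   | none => true
   | some l => l.isEmpty || ((l.map Prod.fst).contains "+" && (l.map Prod.fst).contains "S" && (l.map Prod.fst).contains "F")) = true
instance (d : List (String × List (List Int))) (mapping : Option (List (String × Int))) : Decidable (Pre_flatten_seq d mapping) := by unfold Pre_flatten_seq; infer_instance

def pvWitness_flatten_seq : (List (String × List (List Int))) × (Option (List (String × Int))) :=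
  ([("x", [[1, 2], [3]]), ("y", [])], none)

def Spec_flatten_seq (d : List (String × List (List Int))) (mapping : Option (List (String × Int))) (out : List Int) : Prop := out = flatten_seq_alt d mapping
instance (d : List (String × List (List Int))) (mapping : Option (List (String × Int))) (out : List Int) : Decidable (Spec_flatten_seq d mapping out) := by unfold Spec_flatten_seq; infer_instance

-- ===== CLAIM (what is proved, stated in full; the proofs are below) =====
def Claim_equal_flatten_seq : Prop := ∀ (d : List (String × List (List Int))) (mapping : Option (List (String × Int))), Dom_flatten_seq d mapping → Pre_flatten_seq d mapping → Spec_flatten_seq d mapping (flatten_seq d mapping)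

-- ===== LEMMAS AND PROOFS =====

-- A's inner loop in closed form
theorem pv_inner (plus : Int) (es : List (List Int)) (ra : List Int) :
    es.foldl (fun res expression => (res ++ expression) ++ [plus]) ra
      = ra ++ es.flatMap (fun e => e ++ [plus]) := by
  induction es generalizing ra with
  | nil => simp
  | cons e rest ih =>
    rw [List.foldl_cons, ih, List.flatMap_cons]
    simp [List.append_assoc]

-- A's nested loops in closed form over the flattened expression list
theorem pv_outer (plus : Int) (L : List (String × List (List Int))) (ra : List Int) :
    L.foldl (fun res kv => kv.2.foldl (fun res expression => (res ++ expression) ++ [plus]) res) ra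
      = ra ++ (L.flatMap (fun kv => kv.2)).flatMap (fun e => e ++ [plus]) := by
  induction L generalizing ra with
  | nil => simp
  | cons kv rest ih =>
    rw [List.foldl_cons, pv_inner, ih, List.flatMap_cons, List.flatMap_append]
    simp [List.append_assoc]

-- trailing-separator concatenation = separator join plus one trailing separator
theorem pvJoin_trailing (plus : Int) (es : List (List Int)) (h : es ≠ []) :
    es.flatMap (fun e => e ++ [plus]) = pvJoin plus es ++ [plus] := by
  induction es with
  | nil => exact absurd rfl h
  | cons e rest ih =>
    cases rest with
    | nil => simp [pvJoin]
    | cons e2 r2 => simp [pvJoin, ih (by simp), List.append_assoc]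

-- drop the trailing separator and append the end token, in closed form
theorem pv_drop (s plus f : Int) (J : List Int) :
    ([s] ++ (J ++ [plus])).dropLast ++ [f] = [s] ++ J ++ [f] := by
  have h : [s] ++ (J ++ [plus]) = (s :: J) ++ [plus] := by simp
  rw [h, List.dropLast_concat]
  simp

theorem pv_values (d : List (String × List (List Int))) :
    ((PySem.Dict.ofList d).items).flatMap (fun kv => kv.2)
      = ((PySem.Dict.ofList d).values).flatMap (fun li => li) := by
  simp [PySem.Dict.values, List.flatMap_map]

-- ===== VERDICT (by name: the statement is the Claim_ definition above) =====
theorem flatten_seq_spec : Claim_equal_flatten_seq := by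
  intro d mapping _hdom _hpre
  simp only [Spec_flatten_seq, flatten_seq, flatten_seq_alt]
  rw [pv_outer, ← pv_values]
  cases hE : ((PySem.Dict.ofList d).items).flatMap (fun kv => kv.2) with
  | nil => simp [pvJoin]
  | cons e rest =>
    rw [pvJoin_trailing _ _ (by simp)]
    rw [if_neg (by simp)]
    exact pv_drop _ _ _ _
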